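-- pv_equiv track=rewrite | github.com/thealper2/codewars-solutions | 7-kyu/closing_in_sum.py | closing_in_sum
-- ===== SOURCE A (Python) =====
-- def closing_in_sum(n):
--     str_n = str(n)
--     l, r = 0, len(str_n) - 1
--     total = 0
--
--     while l < r:
--         num = f"{str_n[l]}{str_n[r]}"
--         total += int(num)
--         l += 1
--         r -= 1
--
--     if l == r:
--         total += int(str_n[l])
--
--     return total
-- ===== SOURCE B (Python) =====
-- def closing_in_sum(n):
--     s = str(n)
--     h = len(s) // 2
--     return 10 * sum(int(c) for c in s[:h]) + sum(int(c) for c in s[h:])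
-- ===== Notes on version B (the rewrite author's own statement) =====
-- stated objective: simpler
-- what changed: Replaces the converging two-pointer loop that concatenates and re-parses character pairs with a midpoint split and two weighted digit sums (outer-left digits weigh 10, the rest weigh 1).
-- outside the precondition, e.g. on closing_in_sum(-12): A returns -1, B raises ValueError
import Mathlib
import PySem

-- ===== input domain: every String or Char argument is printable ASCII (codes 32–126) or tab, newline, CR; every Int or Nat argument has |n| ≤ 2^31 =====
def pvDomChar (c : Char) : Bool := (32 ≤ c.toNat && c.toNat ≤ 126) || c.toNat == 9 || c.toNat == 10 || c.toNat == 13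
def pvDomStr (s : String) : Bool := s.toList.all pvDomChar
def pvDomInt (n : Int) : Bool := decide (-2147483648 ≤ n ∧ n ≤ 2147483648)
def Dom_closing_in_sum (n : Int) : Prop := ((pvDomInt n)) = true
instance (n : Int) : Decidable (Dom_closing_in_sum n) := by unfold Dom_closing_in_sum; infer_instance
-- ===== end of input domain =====

-- B replaces A's converging two-pointer pair-concatenation loop by a midpoint split with
-- two weighted digit sums (simpler, same cost); Pre_ restricts to n ≥ 0.


-- ===== PORT A =====
-- A's while loop; l, r kept as Nat: under Pre_ (n ≥ 0) Python's l, r start at 0 and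
-- len-1 ≥ 0 and never go below 0 while they are read, so Nat indices are exact.
-- int(num) is PySem.Int.ofChars?; `.getD 0` is only reached where Python would raise,
-- which Pre_ excludes (all characters of str(n) for n ≥ 0 are digits).
def closingLoop (s : List Char) (l r : Nat) (total : Int) : Int :=
  if l < r then
    closingLoop s (l + 1) (r - 1)
      (total + (PySem.Int.ofChars?
        [PySem.List.pyGetD s (l : Int) ' ', PySem.List.pyGetD s (r : Int) ' ']).getD 0)
  else if l = r then
    total + (PySem.Int.ofChars? [PySem.List.pyGetD s (l : Int) ' ']).getD 0
  else total
termination_by r - l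

def closing_in_sum (n : Int) : Int :=
  let str_n := PySem.Int.toChars n
  closingLoop str_n 0 (str_n.length - 1) 0

-- ===== PORT B =====
def closing_in_sum_alt (n : Int) : Int :=
  let s := PySem.Int.toChars n
  let h := PySem.Int.floordiv (PySem.List.len s) 2
  10 * ((PySem.List.slice s none (some h)).foldl
          (fun t c => t + (PySem.Int.ofChars? [c]).getD 0) 0)
    + ((PySem.List.slice s (some h) none).foldl
          (fun t c => t + (PySem.Int.ofChars? [c]).getD 0) 0)

-- ===== PRECONDITION & SPEC =====
-- Pre_ excludes negative n, on which A pairs the '-' sign with the last digit and returns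
-- an idiosyncratic value (e.g. -1 for -12) while B's per-character int(c) raises ValueError.
def Pre_closing_in_sum (n : Int) : Prop := 0 ≤ n
instance (n : Int) : Decidable (Pre_closing_in_sum n) := by unfold Pre_closing_in_sum; infer_instance
def pvWitness_closing_in_sum : Int := 1234

def Spec_closing_in_sum (n : Int) (out : Int) : Prop := out = closing_in_sum_alt n
instance (n : Int) (out : Int) : Decidable (Spec_closing_in_sum n out) := by unfold Spec_closing_in_sum; infer_instance

-- ===== CLAIM (what is proved, stated in full; the proofs are below) =====
def Claim_equal_closing_in_sum : Prop := ∀ (n : Int), Dom_closing_in_sum n → Pre_closing_in_sum n → Spec_closing_in_sum n (closing_in_sum n)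

-- ===== LEMMAS AND PROOFS =====

-- digit value of a character
def dVal (c : Char) : Int := (c.toNat : Int) - 48
def dSum (xs : List Char) : Int := (xs.map dVal).sum

theorem digit_cases (c : Char) (h : c.isDigit) :
    c = '0' ∨ c = '1' ∨ c = '2' ∨ c = '3' ∨ c = '4' ∨ c = '5' ∨ c = '6' ∨ c = '7' ∨ c = '8' ∨ c = '9' := by
  simp [Char.isDigit] at h
  obtain ⟨h1, h2⟩ := h
  have hc : c = Char.ofNat c.toNat := (Char.ofNat_toNat c).symm
  have h1' : 48 ≤ c.toNat := by exact_mod_cast h1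
  have h2' : c.toNat ≤ 57 := by exact_mod_cast h2
  interval_cases hn : c.toNat <;> simp_all

theorem ofChars_one (c : Char) (h : c.isDigit) :
    PySem.Int.ofChars? [c] = some (dVal c) := by
  rcases digit_cases c h with h|h|h|h|h|h|h|h|h|h <;> subst h <;> decide

theorem ofChars_two (c₁ c₂ : Char) (h₁ : c₁.isDigit) (h₂ : c₂.isDigit) :
    PySem.Int.ofChars? [c₁, c₂] = some (10 * dVal c₁ + dVal c₂) := by
  rcases digit_cases c₁ h₁ with h|h|h|h|h|h|h|h|h|h <;> subst h <;>
    rcases digit_cases c₂ h₂ with h|h|h|h|h|h|h|h|h|h <;> subst h <;> decide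

theorem digitChar_isDigit (m : Nat) (h : m < 10) : (Nat.digitChar m).isDigit := by
  interval_cases m <;> decide

theorem toDigitsCore_digits : ∀ (fuel n : Nat) (ds : List Char),
    (∀ c ∈ ds, c.isDigit) → ∀ c ∈ Nat.toDigitsCore 10 fuel n ds, c.isDigit := by
  intro fuel
  induction fuel with
  | zero => intro n ds hds; simpa [Nat.toDigitsCore] using hds
  | succ f ih =>
    intro n ds hds c hc
    rw [Nat.toDigitsCore] at hc
    by_cases h0 : n / 10 = 0
    · simp [h0] at hc
      rcases hc with hc | hc
      · exact hc ▸ digitChar_isDigit _ (Nat.mod_lt _ (by omega))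
      · exact hds c hc
    · simp [h0] at hc
      refine ih (n / 10) _ ?_ c hc
      intro c' hc'
      rcases List.mem_cons.mp hc' with hc' | hc'
      · exact hc' ▸ digitChar_isDigit _ (Nat.mod_lt _ (by omega))
      · exact hds c' hc'

theorem toDigitsCore_ne_nil : ∀ (fuel n : Nat) (ds : List Char),
    ds ≠ [] → Nat.toDigitsCore 10 fuel n ds ≠ [] := by
  intro fuel
  induction fuel with
  | zero => intro n ds h; simpa [Nat.toDigitsCore] using h
  | succ f ih =>
    intro n ds h
    rw [Nat.toDigitsCore]
    by_cases h0 : n / 10 = 0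
    · simp [h0]
    · simp [h0]
      exact ih (n / 10) _ (by simp)

theorem toChars_digits (n : Int) (hn : 0 ≤ n) :
    ∀ c ∈ PySem.Int.toChars n, c.isDigit := by
  unfold PySem.Int.toChars
  rw [if_neg (by omega)]
  exact toDigitsCore_digits _ _ [] (by simp)

theorem toChars_ne_nil (n : Int) (hn : 0 ≤ n) : PySem.Int.toChars n ≠ [] := by
  unfold PySem.Int.toChars
  rw [if_neg (by omega)]
  unfold Nat.toDigits
  rw [Nat.toDigitsCore]
  by_cases h0 : n.toNat / 10 = 0
  · simp [h0]
  · simp [h0]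
    exact toDigitsCore_ne_nil _ _ _ (by simp)

theorem dSum_append (xs ys : List Char) : dSum (xs ++ ys) = dSum xs + dSum ys := by
  simp [dSum]

-- main loop invariant: closingLoop on s[l..r] adds 10·(sum of left half) + (sum of the rest)
theorem closingLoop_eq (s : List Char) (hd : ∀ c ∈ s, c.isDigit) :
    ∀ (k l r : Nat) (t : Int), r ≤ l + k → r < s.length →
    closingLoop s l r t =
      t + 10 * dSum ((s.drop l).take ((r + 1 - l) / 2))
        + dSum ((s.drop (l + (r + 1 - l) / 2)).take (r + 1 - l - (r + 1 - l) / 2)) := by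
  intro k
  induction k using Nat.strong_induction_on with
  | _ k ih =>
    intro l r t hk hr
    by_cases hlr : l < r
    · -- loop body runs once, then recurse on (l+1, r-1)
      have hls : l < s.length := by omega
      have hl : PySem.List.pyGetD s (l : Int) ' ' = s[l] := by
        simp [PySem.List.pyGetD_natCast, List.getD_eq_getElem?_getD, hls]
      have hrg : PySem.List.pyGetD s (r : Int) ' ' = s[r] := by
        simp [PySem.List.pyGetD_natCast, List.getD_eq_getElem?_getD, hr]
      rw [closingLoop, if_pos hlr, hl, hrg,
          ofChars_two _ _ (hd _ (by simp)) (hd _ (by simp))]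
      simp only [Option.getD_some]
      have hrec := ih (r - l - 2) (by omega) (l + 1) (r - 1) (t + (10 * dVal s[l] + dVal s[r]))
        (by omega) (by omega)
      rw [hrec]
      have hleft : (s.drop l).take ((r + 1 - l) / 2)
          = s[l] :: ((s.drop (l + 1)).take ((r - 1 + 1 - (l + 1)) / 2)) := by
        rw [List.drop_eq_getElem_cons hls,
            show (r + 1 - l) / 2 = (r - 1 + 1 - (l + 1)) / 2 + 1 by omega,
            List.take_succ_cons]
      have hmid : l + 1 + (r - 1 + 1 - (l + 1)) / 2 = l + (r + 1 - l) / 2 := by omega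
      have hq : r - 1 + 1 - (l + 1) - (r - 1 + 1 - (l + 1)) / 2
          = r - l - (r + 1 - l) / 2 := by omega
      have hright : (s.drop (l + (r + 1 - l) / 2)).take (r + 1 - l - (r + 1 - l) / 2)
          = (s.drop (l + (r + 1 - l) / 2)).take (r - l - (r + 1 - l) / 2) ++ [s[r]] := by
        have hlm : l + (r + 1 - l) / 2 ≤ r := by omega
        rw [show r + 1 - l - (r + 1 - l) / 2 = (r - l - (r + 1 - l) / 2) + 1 by omega,
            List.take_add_one]
        congr 1
        have hix : (s.drop (l + (r + 1 - l) / 2))[r - l - (r + 1 - l) / 2]? = some s[r] := by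
          rw [List.getElem?_drop,
              show l + (r + 1 - l) / 2 + (r - l - (r + 1 - l) / 2) = r from by omega,
              List.getElem?_eq_getElem hr]
        simp [hix]
      rw [hleft, hright, hmid, hq, dSum_append]
      simp [dSum]
      ring
    · by_cases heq : l = r
      · -- l = r: the middle digit
        subst heq
        have hls : l < s.length := hr
        have hl : PySem.List.pyGetD s (l : Int) ' ' = s[l] := by
          simp [PySem.List.pyGetD_natCast, List.getD_eq_getElem?_getD, hls]
        rw [closingLoop, if_neg (by omega), if_pos rfl, hl,
            ofChars_one _ (hd _ (by simp))]
        simp only [Option.getD_some]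
        have h1 : (l + 1 - l) / 2 = 0 := by omega
        rw [h1]
        have h2 : l + 1 - l - 0 = 1 := by omega
        rw [h2]
        have : (s.drop (l + 0)).take 1 = [s[l]] := by
          rw [Nat.add_zero, List.drop_eq_getElem_cons hls, List.take_succ_cons, List.take_zero]
        rw [this]
        simp [dSum]
      · -- l > r: loop never runs, all segments empty
        have hgl : r < l := by omega
        rw [closingLoop, if_neg (by omega), if_neg heq]
        have h1 : (r + 1 - l) / 2 = 0 := by omega
        rw [h1]
        have h2 : r + 1 - l - 0 = 0 := by omega
        rw [h2]
        simp [dSum]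

theorem foldl_digits (xs : List Char) (hd : ∀ c ∈ xs, c.isDigit) :
    xs.foldl (fun t c => t + (PySem.Int.ofChars? [c]).getD 0) 0 = dSum xs := by
  rw [PySem.List.foldl_add xs (fun c => (PySem.Int.ofChars? [c]).getD 0) 0]
  simp only [dSum, zero_add]
  congr 1
  refine List.map_congr_left ?_
  intro c hc
  rw [ofChars_one c (hd c hc)]
  rfl

-- ===== VERDICT (by name: the statement is the Claim_ definition above) =====
theorem closing_in_sum_spec : Claim_equal_closing_in_sum := by
  intro n _ hpre
  unfold Spec_closing_in_sum
  show closingLoop (PySem.Int.toChars n) 0 ((PySem.Int.toChars n).length - 1) 0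
    = 10 * ((PySem.List.slice (PySem.Int.toChars n) none
              (some (PySem.Int.floordiv (PySem.List.len (PySem.Int.toChars n)) 2))).foldl
            (fun t c => t + (PySem.Int.ofChars? [c]).getD 0) 0)
      + ((PySem.List.slice (PySem.Int.toChars n)
              (some (PySem.Int.floordiv (PySem.List.len (PySem.Int.toChars n)) 2)) none).foldl
            (fun t c => t + (PySem.Int.ofChars? [c]).getD 0) 0)
  have hd : ∀ c ∈ PySem.Int.toChars n, c.isDigit := toChars_digits n hpre
  have hne : PySem.Int.toChars n ≠ [] := toChars_ne_nil n hpre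
  set s := PySem.Int.toChars n with hs
  have hL : 0 < s.length := List.length_pos_of_ne_nil hne
  have hfd : PySem.Int.floordiv (PySem.List.len s) 2 = ((s.length / 2 : Nat) : Int) := by
    rw [PySem.List.len_eq]
    exact_mod_cast PySem.Int.floordiv_natCast s.length 2
  rw [hfd, PySem.List.slice_to_natCast, PySem.List.slice_from_natCast]
  rw [foldl_digits _ (fun c hc => hd c (List.mem_of_mem_take hc)),
      foldl_digits _ (fun c hc => hd c (List.mem_of_mem_drop hc))]
  rw [closingLoop_eq s hd s.length 0 (s.length - 1) 0 (by omega) (by omega)]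
  rw [show s.length - 1 + 1 - 0 = s.length by omega]
  rw [show (s.drop 0).take (s.length / 2) = s.take (s.length / 2) by simp]
  rw [show (s.drop (0 + s.length / 2)).take (s.length - s.length / 2)
      = s.drop (s.length / 2) by
    rw [Nat.zero_add]
    apply List.take_of_length_le
    simp]
  ring
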